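-- pv_equiv track=rewrite | github.com/Damien-gitmaino/AOC_2024 | Day 8: Resonant Collinearity/main.py | count_resonant_antinode_locations
-- ===== SOURCE A (Python) =====
-- from itertools import combinations
-- from math import gcd
--
-- def count_resonant_antinode_locations(grid):
--     antennas = []
--     for y, row in enumerate(grid):
--         for x, cell in enumerate(row):
--             if cell != '.':
--                 antennas.append((x, y, cell))
--
--     def direction(dx, dy):
--         if dx == 0 and dy == 0:
--             return (0, 0)
--         g = gcd(dx, dy)
--         return (dx // g, dy // g)
--
--     antinodes = set()
--     antenna_by_freq = {}
--
--     for x, y, freq in antennas: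
--         if freq not in antenna_by_freq:
--             antenna_by_freq[freq] = []
--         antenna_by_freq[freq].append((x, y))
--
--
--     for freq, freq_antennas in antenna_by_freq.items():
--         for a1, a2 in combinations(freq_antennas, 2):
--             x1, y1 = a1
--             x2, y2 = a2
--             dx, dy = x2 - x1, y2 - y1
--             dir_vector = direction(dx, dy)
--
--             in_line = set()
--             for ax, ay in freq_antennas:
--                 dx, dy = ax - x1, ay - y1
--                 if direction(dx, dy) == dir_vector:
--                     in_line.add((ax, ay))
--
--             antinodes.update(in_line)
--
--             for factor in range(-len(grid) * len(grid[0]), len(grid) * len(grid[0])):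
--                 nx, ny = x1 + factor * dir_vector[0], y1 + factor * dir_vector[1]
--                 if 0 <= nx < len(grid[0]) and 0 <= ny < len(grid):
--                     antinodes.add((nx, ny))
--
--     return len(antinodes)
-- ===== SOURCE B (Python) =====
-- from itertools import combinations
--
--
-- def count_resonant_antinode_locations(grid):
--     ants = [(x, y, c) for y, row in enumerate(grid) for x, c in enumerate(row) if c != '.']
--     pairs = [(x1, y1, x2, y2)
--              for (x1, y1, c1), (x2, y2, c2) in combinations(ants, 2) if c1 == c2]
--     height = len(grid)
--     width = len(grid[0]) if grid else 0
--     return sum(1 for y in range(height) for x in range(width)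
--                if any((x - x1) * (y2 - y1) == (y - y1) * (x2 - x1)
--                       for (x1, y1, x2, y2) in pairs))
-- ===== Notes on version B (the rewrite author's own statement) =====
-- stated objective: alternative
-- what changed: Instead of generating points along each antenna pair's line (a factor scan of range(-H*W, H*W) per pair plus an 'in line' antenna set), B scans every cell of the grid frame once and marks it if the integer cross product with some same-frequency antenna pair vanishes, so no point-generation, no sets and no frequency dictionary are needed.
-- outside the precondition, e.g. on count_resonant_antinode_locations(['.', 'aa']): A returns 2, B returns 1
import Mathlib
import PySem

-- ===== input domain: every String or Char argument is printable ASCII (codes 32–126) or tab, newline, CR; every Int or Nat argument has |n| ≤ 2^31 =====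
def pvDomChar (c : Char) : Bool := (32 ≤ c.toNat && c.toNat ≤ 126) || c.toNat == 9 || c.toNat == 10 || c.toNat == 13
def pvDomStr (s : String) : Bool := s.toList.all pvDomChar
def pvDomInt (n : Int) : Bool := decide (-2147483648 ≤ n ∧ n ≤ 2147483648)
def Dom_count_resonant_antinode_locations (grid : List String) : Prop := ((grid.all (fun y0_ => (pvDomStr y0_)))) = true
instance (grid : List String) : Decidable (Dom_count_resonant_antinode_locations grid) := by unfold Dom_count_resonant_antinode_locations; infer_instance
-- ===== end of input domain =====

-- B replaces A's per-pair point generation (factor scan plus an 'in line' antenna set, collected in a set)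
-- by one scan of the grid frame testing each cell's cross product against the same-frequency pairs; return
-- values agree on Pre_ (grids whose paired antennas lie in the x-range of row 0, as in any rectangular grid).

-- ===== PORT A =====
-- A-side helper: direction(dx, dy) — math.gcd is Int.gcd (nonnegative), '//' is PySem.Int.floordiv
def pvDirection (dx dy : Int) : Int × Int :=
  if dx = 0 ∧ dy = 0 then (0, 0)
  else
    let g : Int := (Int.gcd dx dy : Int)
    (PySem.Int.floordiv dx g, PySem.Int.floordiv dy g)

-- helper shared by both ports: itertools.combinations(xs, 2), in its order (both Pythons call it)
def pvCombinations {α : Type} : List α → List (α × α)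
  | [] => []
  | x :: t => t.map (fun y => (x, y)) ++ pvCombinations t

-- `len(grid[0])` is ported as `PySem.Str.len (PySem.List.pyGetD grid 0 "")`: exact wherever Python
-- evaluates it, since it is only reached when an antenna pair exists, hence grid ≠ [].
def count_resonant_antinode_locations (grid : List String) : Int :=
  let antennas : List (Int × Int × Char) :=
    (PySem.List.enumerate grid 0).foldl (fun acc yr =>
      (PySem.List.enumerate yr.2.toList 0).foldl (fun acc xc =>
        if xc.2 ≠ '.' then acc ++ [(xc.1, yr.1, xc.2)] else acc) acc) []
  let antenna_by_freq : PySem.Dict Char (List (Int × Int)) :=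
    antennas.foldl (fun d t =>
      let d := if d.contains t.2.2 = false then d.insert t.2.2 [] else d
      d.modify t.2.2 [] (fun l => l ++ [(t.1, t.2.1)])) PySem.Dict.empty
  let antinodes : PySem.Set (Int × Int) :=
    antenna_by_freq.items.foldl (fun an fg =>
      (pvCombinations fg.2).foldl (fun an pr =>
        let x1 := pr.1.1
        let y1 := pr.1.2
        let x2 := pr.2.1
        let y2 := pr.2.2
        let dv := pvDirection (x2 - x1) (y2 - y1)
        let inLine : PySem.Set (Int × Int) :=
          fg.2.foldl (fun il a =>
            if pvDirection (a.1 - x1) (a.2 - y1) = dv then PySem.Set.add il a else il)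
            PySem.Set.empty
        let an := PySem.Set.update an inLine
        (PySem.List.pyRange
            (-(PySem.List.len grid * PySem.Str.len (PySem.List.pyGetD grid 0 "")))
            (PySem.List.len grid * PySem.Str.len (PySem.List.pyGetD grid 0 "")) 1).foldl
          (fun an factor =>
            let nx := x1 + factor * dv.1
            let ny := y1 + factor * dv.2
            if 0 ≤ nx ∧ nx < PySem.Str.len (PySem.List.pyGetD grid 0 "") ∧
               0 ≤ ny ∧ ny < PySem.List.len grid
            then PySem.Set.add an (nx, ny) else an) an) an)
      PySem.Set.empty
  PySem.Set.len antinodes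

-- ===== PORT B =====
-- B-side helper: the antenna comprehension [(x, y, c) for y, row in enumerate(grid) for x, c in enumerate(row) if c != '.']
def pvAnts (grid : List String) : List (Int × Int × Char) :=
  (PySem.List.enumerate grid 0).flatMap (fun yr =>
    ((PySem.List.enumerate yr.2.toList 0).filter (fun xc => xc.2 ≠ '.')).map
      (fun xc => (xc.1, yr.1, xc.2)))

def count_resonant_antinode_locations_alt (grid : List String) : Int :=
  let ants := pvAnts grid
  let pairs : List (Int × Int × Int × Int) :=
    ((pvCombinations ants).filter (fun ab => ab.1.2.2 == ab.2.2.2)).map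
      (fun ab => (ab.1.1, ab.1.2.1, ab.2.1, ab.2.2.1))
  let height := PySem.List.len grid
  let width := if grid ≠ [] then PySem.Str.len (PySem.List.pyGetD grid 0 "") else 0
  ((PySem.List.pyRange 0 height 1).flatMap (fun y =>
      (PySem.List.pyRange 0 width 1).map (fun x => (x, y)))).foldl
    (fun acc p =>
      if pairs.any (fun q =>
          decide ((p.1 - q.1) * (q.2.2.2 - q.2.1) = (p.2 - q.2.1) * (q.2.2.1 - q.1)))
      then acc + 1 else acc) 0

-- ===== PRECONDITION & SPEC =====
-- Pre_ restricts to the natural domain of this puzzle, rectangular antenna grids: every antenna with a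
-- same-frequency partner lies within the x-range of row 0. On ragged grids violating this, A's count
-- includes coordinates outside the grid frame and can miss in-frame cells (its factor scan is sized for
-- in-frame antennas) — corner values no specification covers.
def Pre_count_resonant_antinode_locations (grid : List String) : Prop :=
  ∀ p ∈ pvAnts grid,
    (∃ q ∈ pvAnts grid, (q.1, q.2.1) ≠ (p.1, p.2.1) ∧ q.2.2 = p.2.2) →
      p.1 < PySem.Str.len (PySem.List.pyGetD grid 0 "")

instance (grid : List String) : Decidable (Pre_count_resonant_antinode_locations grid) := by
  unfold Pre_count_resonant_antinode_locations; infer_instance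

def pvWitness_count_resonant_antinode_locations : List String := ["aa..", "...."]

def Spec_count_resonant_antinode_locations (grid : List String) (out : Int) : Prop := out = count_resonant_antinode_locations_alt grid
instance (grid : List String) (out : Int) : Decidable (Spec_count_resonant_antinode_locations grid out) := by unfold Spec_count_resonant_antinode_locations; infer_instance

-- ===== CLAIM (what is proved, stated in full; the proofs are below) =====
def Claim_equal_count_resonant_antinode_locations : Prop := ∀ (grid : List String), Dom_count_resonant_antinode_locations grid → Pre_count_resonant_antinode_locations grid → Spec_count_resonant_antinode_locations grid (count_resonant_antinode_locations grid)

-- ===== LEMMAS AND PROOFS =====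

-- -------- abbreviations used only by the proofs --------
def pvW (grid : List String) : Int := PySem.Str.len (PySem.List.pyGetD grid 0 "")
def pvH (grid : List String) : Int := PySem.List.len grid
def pvPos (t : Int × Int × Char) : Int × Int := (t.1, t.2.1)
def pvColl (p a b : Int × Int) : Prop := (p.1 - a.1) * (b.2 - a.2) = (p.2 - a.2) * (b.1 - a.1)
def pvFrame (grid : List String) (p : Int × Int) : Prop :=
  0 ≤ p.1 ∧ p.1 < pvW grid ∧ 0 ≤ p.2 ∧ p.2 < pvH grid
def pvPred (grid : List String) (p : Int × Int) : Prop :=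
  ∃ ab ∈ pvCombinations (pvAnts grid), ab.1.2.2 = ab.2.2.2 ∧ pvColl p (pvPos ab.1) (pvPos ab.2)
def pvFreqs (grid : List String) : List Char := (pvAnts grid).map (fun t => t.2.2)
def pvGroup (grid : List String) (c : Char) : List (Int × Int) :=
  ((pvAnts grid).filter (fun t => t.2.2 == c)).map (fun t => (t.1, t.2.1))
def pvGroupF (d : PySem.Dict Char (List (Int × Int))) (t : Int × Int × Char) :
    PySem.Dict Char (List (Int × Int)) :=
  let d := if d.contains t.2.2 = false then d.insert t.2.2 [] else d
  d.modify t.2.2 [] (fun l => l ++ [(t.1, t.2.1)])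

-- -------- generic fold lemmas --------
theorem pv_mem_foldl {α β : Type} (l : List α) (F : List β → α → List β) (Q : α → β → Prop)
    (h : ∀ s x p, x ∈ l → (p ∈ F s x ↔ p ∈ s ∨ Q x p)) (s : List β) (p : β) :
    p ∈ l.foldl F s ↔ p ∈ s ∨ ∃ x ∈ l, Q x p := by
  induction l generalizing s with
  | nil => simp
  | cons a t ih =>
    simp only [List.foldl_cons]
    rw [ih (fun s x p hx => h s x p (List.mem_cons_of_mem _ hx)) (F s a),
        h s a p (List.mem_cons_self)]
    simp only [List.mem_cons]
    constructor
    · rintro ((h | h) | ⟨x, hx, hq⟩)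
      · exact Or.inl h
      · exact Or.inr ⟨a, Or.inl rfl, h⟩
      · exact Or.inr ⟨x, Or.inr hx, hq⟩
    · rintro (h | ⟨x, (rfl | hx), hq⟩)
      · exact Or.inl (Or.inl h)
      · exact Or.inl (Or.inr hq)
      · exact Or.inr ⟨x, hx, hq⟩

theorem pv_nodup_foldl {α β : Type} (l : List α) (F : List β → α → List β)
    (h : ∀ s x, x ∈ l → s.Nodup → (F s x).Nodup) (s : List β) (hs : s.Nodup) :
    (l.foldl F s).Nodup := by
  induction l generalizing s with
  | nil => exact hs
  | cons a t ih =>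
    exact ih (fun s x hx => h s x (List.mem_cons_of_mem _ hx)) _
      (h s a (List.mem_cons_self) hs)

-- -------- combinations lemmas --------
theorem pvCombinations_map {α β : Type} (f : α → β) (l : List α) :
    pvCombinations (l.map f) = (pvCombinations l).map (fun ab => (f ab.1, f ab.2)) := by
  induction l with
  | nil => rfl
  | cons x t ih => simp [pvCombinations, ih, List.map_map, Function.comp]

theorem pvCombinations_filter {α : Type} (q : α → Bool) (l : List α) :
    pvCombinations (l.filter q) = (pvCombinations l).filter (fun ab => q ab.1 && q ab.2) := by
  induction l with
  | nil => rfl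
  | cons x t ih =>
    by_cases hx : q x = true
    · simp only [List.filter_cons, hx, if_pos, pvCombinations, ih, List.filter_append,
        List.filter_map]
      simp [Function.comp_def, hx]
    · simp only [List.filter_cons, hx, Bool.false_eq_true, pvCombinations,
        List.filter_append, List.filter_map]
      simp [Function.comp_def, hx, ih]

theorem pvCombinations_mem {α : Type} {l : List α} {ab : α × α} (h : ab ∈ pvCombinations l) :
    ab.1 ∈ l ∧ ab.2 ∈ l := by
  induction l with
  | nil => simp [pvCombinations] at h
  | cons x t ih =>
    simp only [pvCombinations, List.mem_append, List.mem_map] at h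
    rcases h with ⟨y, hy, he⟩ | h
    · obtain rfl := he.symm; simp [hy]
    · have := ih h; simp [this.1, this.2]

theorem pvCombinations_pairwise {α : Type} {R : α → α → Prop} {l : List α}
    (h : l.Pairwise R) : ∀ ab ∈ pvCombinations l, R ab.1 ab.2 := by
  induction l with
  | nil => simp [pvCombinations]
  | cons x t ih =>
    rcases List.pairwise_cons.mp h with ⟨hx, ht⟩
    intro ab hab
    simp only [pvCombinations, List.mem_append, List.mem_map] at hab
    rcases hab with ⟨y, hy, he⟩ | hab
    · obtain rfl := he.symm; exact hx y hy
    · exact ih ht ab hab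

-- -------- antennas: bounds and distinct positions --------
theorem pvAnts_bounds {grid : List String} {t : Int × Int × Char} (h : t ∈ pvAnts grid) :
    0 ≤ t.1 ∧ 0 ≤ t.2.1 ∧ t.2.1 < pvH grid := by
  simp only [pvAnts, List.mem_flatMap, List.mem_map, List.mem_filter,
    PySem.List.mem_enumerate_iff] at h
  obtain ⟨yr, ⟨k, hk, rfl⟩, xc, ⟨⟨j, hj, rfl⟩, -⟩, rfl⟩ := h
  simp only [pvH, PySem.List.len_eq]
  refine ⟨by positivity, by positivity, ?_⟩
  simpa using hk

theorem pvAnts_pairwise (grid : List String) :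
    (pvAnts grid).Pairwise (fun s t => pvPos s ≠ pvPos t) := by
  have hlex : (pvAnts grid).Pairwise
      (fun s t => s.2.1 < t.2.1 ∨ (s.2.1 = t.2.1 ∧ s.1 < t.1)) := by
    unfold pvAnts
    rw [List.pairwise_flatMap]
    constructor
    · intro yr hyr
      refine List.Pairwise.map _ (fun a b hab => ?_)
        ((PySem.List.pairwise_lt_enumerate yr.2.toList 0).filter _)
      exact Or.inr ⟨rfl, hab⟩
    · refine (PySem.List.pairwise_lt_enumerate grid 0).imp ?_
      rintro a b hab x hx y hy
      simp only [List.mem_map] at hx hy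
      obtain ⟨xc, -, rfl⟩ := hx
      obtain ⟨yc, -, rfl⟩ := hy
      exact Or.inl hab
  refine hlex.imp (fun {s t} h => ?_)
  rcases h with h | ⟨h1, h2⟩
  · intro he
    rw [pvPos, pvPos, Prod.mk.injEq] at he
    omega
  · intro he
    rw [pvPos, pvPos, Prod.mk.injEq] at he
    omega

-- -------- the grouping dictionary --------
theorem pv_insert_insert {κ ν : Type} [BEq κ] [LawfulBEq κ] (d : PySem.Dict κ ν) (k : κ)
    (h : d.contains k = false) (v w : ν) : (d.insert k v).insert k w = d.insert k w := by
  apply PySem.Dict.ext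
  have hk : ∀ p ∈ d.items, (p.1 == k) = false := by
    intro p hp
    by_contra hb
    have : p.1 = k := by
      cases hbe : p.1 == k with
      | false => exact absurd hbe hb
      | true => exact eq_of_beq hbe
    subst this
    have : d.contains p.1 = true := (PySem.Dict.contains_iff_mem_keys d p.1).mpr
      (by simp only [PySem.Dict.keys]; exact List.mem_map_of_mem hp)
    rw [this] at h; exact Bool.true_eq_false.mp h
  have h1 : (d.insert k v).contains k = true := PySem.Dict.contains_insert_self d k v
  rw [PySem.Dict.items_insert_of_contains _ _ h1, PySem.Dict.items_insert_of_not_contains _ _ h,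
      PySem.Dict.items_insert_of_not_contains _ _ h, List.map_append]
  have hmap : d.items.map (fun p => if (p.1 == k) = true then (k, w) else p) = d.items := by
    calc d.items.map (fun p => if (p.1 == k) = true then (k, w) else p)
        = d.items.map id := List.map_congr_left (fun p hp => by simp [hk p hp])
      _ = d.items := List.map_id _
  rw [hmap]
  simp

theorem pvGroupF_eq (d : PySem.Dict Char (List (Int × Int))) (t : Int × Int × Char) :
    pvGroupF d t = d.modify t.2.2 [] (fun l => l ++ [(t.1, t.2.1)]) := by
  by_cases hc : d.contains t.2.2 = true
  · simp only [pvGroupF]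
    rw [if_neg (by simp [hc])]
  · have hc' : d.contains t.2.2 = false := by
      cases hb : d.contains t.2.2 with
      | false => rfl
      | true => exact absurd hb hc
    simp only [pvGroupF]
    rw [if_pos hc']
    have e1 : ((d.insert t.2.2 []).modify t.2.2 [] (fun l => l ++ [(t.1, t.2.1)]))
        = (d.insert t.2.2 []).insert t.2.2 (((d.insert t.2.2 []).getD t.2.2 []) ++ [(t.1, t.2.1)]) := rfl
    have e2 : (d.modify t.2.2 [] (fun l => l ++ [(t.1, t.2.1)]))
        = d.insert t.2.2 ((d.getD t.2.2 []) ++ [(t.1, t.2.1)]) := rfl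
    rw [e1, e2, PySem.Dict.getD_insert_self, PySem.Dict.getD_of_not_contains d _ hc',
        pv_insert_insert d _ hc']

theorem pvDict_fold_eq (grid : List String) :
    (pvAnts grid).foldl pvGroupF PySem.Dict.empty
      = ((pvAnts grid).map (fun t => (t.2.2, (t.1, t.2.1)))).foldl
          (fun d p => d.modify p.1 [] (fun l => l ++ [p.2])) PySem.Dict.empty := by
  rw [List.foldl_map]
  exact PySem.List.foldl_congr_mem _ _ _ _ (fun acc x _ => pvGroupF_eq acc x)

theorem pvDict_getD (grid : List String) (c : Char) :
    ((pvAnts grid).foldl pvGroupF PySem.Dict.empty).getD c [] = pvGroup grid c := by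
  rw [pvDict_fold_eq, PySem.Dict.getD_foldl_modify_append, PySem.Dict.getD_empty,
      List.filter_map, List.map_map]
  unfold pvGroup
  simp [Function.comp_def]

theorem pvDict_keys (grid : List String) :
    ((pvAnts grid).foldl pvGroupF PySem.Dict.empty).keys = PySem.Set.ofList (pvFreqs grid) := by
  rw [pvDict_fold_eq]
  refine Eq.trans (PySem.Dict.keys_foldl_modify_key
    ((pvAnts grid).map (fun t => (t.2.2, t.1, t.2.1))) (fun p => p.1) []
    (fun _ p l => l ++ [p.2]) PySem.Dict.empty) ?_
  rw [PySem.Dict.keys_empty, PySem.Set.update_nil_left, List.map_map]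
  rfl

theorem pvDict_nodup_keys (grid : List String) :
    ((pvAnts grid).foldl pvGroupF PySem.Dict.empty).keys.Nodup := by
  rw [pvDict_fold_eq]
  exact PySem.Dict.nodup_keys_foldl_modify_key
    ((pvAnts grid).map (fun t => (t.2.2, t.1, t.2.1))) (fun p => p.1) []
    (fun _ p l => l ++ [p.2]) PySem.Dict.empty
    (by rw [PySem.Dict.keys_empty]; exact List.nodup_nil)

theorem pvDict_items (grid : List String) :
    ((pvAnts grid).foldl pvGroupF PySem.Dict.empty).items
      = (PySem.Set.ofList (pvFreqs grid)).map (fun c => (c, pvGroup grid c)) := by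
  rw [PySem.Dict.items_eq_map_keys _ (pvDict_nodup_keys grid) [], pvDict_keys]
  exact List.map_congr_left (fun c _ => by rw [pvDict_getD])

-- -------- arithmetic of direction --------
theorem pvDirection_scale {dx dy : Int} (h : ¬ (dx = 0 ∧ dy = 0)) :
    0 < (Int.gcd dx dy : Int) ∧
    dx = (Int.gcd dx dy : Int) * (pvDirection dx dy).1 ∧
    dy = (Int.gcd dx dy : Int) * (pvDirection dx dy).2 ∧
    Int.gcd (pvDirection dx dy).1 (pvDirection dx dy).2 = 1 := by
  have hg0 : Int.gcd dx dy ≠ 0 := by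
    rw [Ne, Int.gcd_eq_zero_iff]; exact h
  have hgn : 0 < Int.gcd dx dy := Nat.pos_of_ne_zero hg0
  have hg : 0 < (Int.gcd dx dy : Int) := by exact_mod_cast hgn
  have hdx : ((Int.gcd dx dy : Int)) ∣ dx := Int.gcd_dvd_left dx dy
  have hdy : ((Int.gcd dx dy : Int)) ∣ dy := Int.gcd_dvd_right dx dy
  have e : pvDirection dx dy
      = (PySem.Int.floordiv dx (Int.gcd dx dy : Int), PySem.Int.floordiv dy (Int.gcd dx dy : Int)) := by
    rw [pvDirection, if_neg h]
  rw [e]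
  simp only [PySem.Int.floordiv_eq_ediv_of_pos hg]
  refine ⟨hg, (Int.mul_ediv_cancel' hdx).symm, (Int.mul_ediv_cancel' hdy).symm, ?_⟩
  exact Int.gcd_div_gcd_div_gcd hgn

theorem pvDirection_ne_zero {dx dy : Int} (h : ¬ (dx = 0 ∧ dy = 0)) :
    ¬ ((pvDirection dx dy).1 = 0 ∧ (pvDirection dx dy).2 = 0) := by
  obtain ⟨hg, hx, hy, -⟩ := pvDirection_scale h
  rintro ⟨h1, h2⟩
  rw [h1, mul_zero] at hx
  rw [h2, mul_zero] at hy
  exact h ⟨hx, hy⟩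

theorem pv_parallel {d1 d2 u v : Int} (hg : Int.gcd d1 d2 = 1) (hnz : ¬ (d1 = 0 ∧ d2 = 0))
    (h : u * d2 = v * d1) : ∃ t : Int, u = t * d1 ∧ v = t * d2 := by
  by_cases hd1 : d1 = 0
  · subst hd1
    have hd2 : d2 = 1 ∨ d2 = -1 := by
      have : d2.natAbs = 1 := by
        have := hg; rw [Int.gcd] at this; simpa using this
      rcases Int.natAbs_eq d2 with he | he <;> rw [this] at he <;> [left; right] <;> omega
    have hu : u = 0 := by
      rcases hd2 with rfl | rfl <;> omega
    refine ⟨v * d2, by rw [hu, mul_zero], ?_⟩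
    rcases hd2 with rfl | rfl <;> ring
  · have hco : IsCoprime d1 d2 := Int.isCoprime_iff_gcd_eq_one.mpr hg
    have hdvd : d1 ∣ u * d2 := ⟨v, by rw [h, mul_comm]⟩
    have hdu : d1 ∣ u := hco.dvd_of_dvd_mul_right hdvd
    obtain ⟨t, rfl⟩ := hdu
    refine ⟨t, by ring, ?_⟩
    have : d1 * (t * d2) = d1 * v := by ring_nf; ring_nf at h; linarith [h]
    have := mul_left_cancel₀ hd1 this
    omega

-- -------- counting --------
def pvPairsL (grid : List String) : List (Int × Int × Int × Int) :=
  ((pvCombinations (pvAnts grid)).filter (fun ab => ab.1.2.2 == ab.2.2.2)).map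
    (fun ab => (ab.1.1, ab.1.2.1, ab.2.1, ab.2.2.1))

def pvPredB (grid : List String) (p : Int × Int) : Bool :=
  (pvPairsL grid).any (fun q =>
    decide ((p.1 - q.1) * (q.2.2.2 - q.2.1) = (p.2 - q.2.1) * (q.2.2.1 - q.1)))

def pvCells (grid : List String) : List (Int × Int) :=
  (PySem.List.pyRange 0 (pvH grid) 1).flatMap (fun y =>
    (PySem.List.pyRange 0 (pvW grid) 1).map (fun x => (x, y)))

theorem pv_width_eq (grid : List String) :
    (if grid ≠ [] then PySem.Str.len (PySem.List.pyGetD grid 0 "") else 0) = pvW grid := by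
  by_cases hg : grid = []
  · subst hg; simp [pvW]
  · rw [if_pos hg]; rfl

theorem pv_alt_eq (grid : List String) :
    count_resonant_antinode_locations_alt grid = ((pvCells grid).countP (pvPredB grid) : Int) := by
  simp only [count_resonant_antinode_locations_alt, pv_width_eq]
  rw [PySem.List.foldl_if_add_one]
  simp only [zero_add]
  rfl

theorem pv_mem_cells (grid : List String) (p : Int × Int) :
    p ∈ pvCells grid ↔ pvFrame grid p := by
  simp only [pvCells, List.mem_flatMap, List.mem_map, PySem.List.mem_pyRange_one, pvFrame]
  constructor
  · rintro ⟨y, ⟨hy0, hyH⟩, x, ⟨hx0, hxW⟩, rfl⟩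
    exact ⟨hx0, hxW, hy0, hyH⟩
  · rintro ⟨h1, h2, h3, h4⟩
    exact ⟨p.2, ⟨h3, h4⟩, p.1, ⟨h1, h2⟩, rfl⟩

theorem pv_cells_nodup (grid : List String) : (pvCells grid).Nodup := by
  have : (pvCells grid).Pairwise (· ≠ ·) := by
    unfold pvCells
    rw [List.pairwise_flatMap]
    constructor
    · intro y hy
      refine List.Pairwise.map _ (fun a b hab => ?_) (PySem.List.pairwise_lt_pyRange_one 0 (pvW grid))
      intro he
      rw [Prod.mk.injEq] at he
      omega
    · refine (PySem.List.pairwise_lt_pyRange_one 0 (pvH grid)).imp ?_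
      rintro a b hab x hx y hy
      simp only [List.mem_map] at hx hy
      obtain ⟨xc, -, rfl⟩ := hx
      obtain ⟨yc, -, rfl⟩ := hy
      intro he
      rw [Prod.mk.injEq] at he
      omega
  exact this

theorem pv_predB_iff (grid : List String) (p : Int × Int) :
    pvPredB grid p = true ↔ pvPred grid p := by
  simp only [pvPredB, pvPairsL, List.any_eq_true, List.mem_map, List.mem_filter, pvPred,
    decide_eq_true_eq, beq_iff_eq, pvColl, pvPos]
  constructor
  · rintro ⟨q, ⟨ab, ⟨hab, hfr⟩, rfl⟩, hcoll⟩
    exact ⟨ab, hab, hfr, hcoll⟩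
  · rintro ⟨ab, hab, hfr, hcoll⟩
    exact ⟨_, ⟨ab, ⟨hab, hfr⟩, rfl⟩, hcoll⟩

theorem pv_count (grid : List String) (s : List (Int × Int)) (hs : s.Nodup)
    (hmem : ∀ p, p ∈ s ↔ pvFrame grid p ∧ pvPred grid p) :
    (s.length : Int) = count_resonant_antinode_locations_alt grid := by
  rw [pv_alt_eq, List.countP_eq_length_filter]
  have hperm : s.Perm ((pvCells grid).filter (pvPredB grid)) := by
    rw [List.perm_ext_iff_of_nodup hs ((pv_cells_nodup grid).filter _)]
    intro p
    rw [hmem, List.mem_filter, pv_mem_cells, pv_predB_iff]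
  rw [hperm.length_eq]

-- -------- A's antinode set, restated over pvAnts --------
def pvDV (pr : (Int × Int) × (Int × Int)) : Int × Int :=
  pvDirection (pr.2.1 - pr.1.1) (pr.2.2 - pr.1.2)

def pvQF (grid : List String) (pr : (Int × Int) × (Int × Int)) (p : Int × Int) : Prop :=
  ∃ f ∈ PySem.List.pyRange (-(PySem.List.len grid * PySem.Str.len (PySem.List.pyGetD grid 0 "")))
      (PySem.List.len grid * PySem.Str.len (PySem.List.pyGetD grid 0 "")) 1,
    (0 ≤ pr.1.1 + f * (pvDV pr).1 ∧ pr.1.1 + f * (pvDV pr).1 < PySem.Str.len (PySem.List.pyGetD grid 0 "") ∧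
     0 ≤ pr.1.2 + f * (pvDV pr).2 ∧ pr.1.2 + f * (pvDV pr).2 < PySem.List.len grid) ∧
    p = (pr.1.1 + f * (pvDV pr).1, pr.1.2 + f * (pvDV pr).2)

def pvQIn (g : List (Int × Int)) (pr : (Int × Int) × (Int × Int)) (p : Int × Int) : Prop :=
  ∃ a ∈ g, pvDirection (a.1 - pr.1.1) (a.2 - pr.1.2) = pvDV pr ∧ p = a

def pvPairF (grid : List String) (g : List (Int × Int)) (an : PySem.Set (Int × Int))
    (pr : (Int × Int) × (Int × Int)) : PySem.Set (Int × Int) :=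
  let x1 := pr.1.1
  let y1 := pr.1.2
  let x2 := pr.2.1
  let y2 := pr.2.2
  let dv := pvDirection (x2 - x1) (y2 - y1)
  let inLine : PySem.Set (Int × Int) :=
    g.foldl (fun il a =>
      if pvDirection (a.1 - x1) (a.2 - y1) = dv then PySem.Set.add il a else il)
      PySem.Set.empty
  let an := PySem.Set.update an inLine
  (PySem.List.pyRange
      (-(PySem.List.len grid * PySem.Str.len (PySem.List.pyGetD grid 0 "")))
      (PySem.List.len grid * PySem.Str.len (PySem.List.pyGetD grid 0 "")) 1).foldl
    (fun an factor =>
      let nx := x1 + factor * dv.1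
      let ny := y1 + factor * dv.2
      if 0 ≤ nx ∧ nx < PySem.Str.len (PySem.List.pyGetD grid 0 "") ∧
         0 ≤ ny ∧ ny < PySem.List.len grid
      then PySem.Set.add an (nx, ny) else an) an

def pvAntinodes (grid : List String) : PySem.Set (Int × Int) :=
  (((pvAnts grid).foldl pvGroupF PySem.Dict.empty).items).foldl
    (fun an fg => (pvCombinations fg.2).foldl (pvPairF grid fg.2) an) PySem.Set.empty

theorem pvAntsA_eq (grid : List String) :
    (PySem.List.enumerate grid 0).foldl (fun acc yr =>
      (PySem.List.enumerate yr.2.toList 0).foldl (fun acc xc =>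
        if xc.2 ≠ '.' then acc ++ [(xc.1, yr.1, xc.2)] else acc) acc)
      ([] : List (Int × Int × Char)) = pvAnts grid := by
  refine Eq.trans (PySem.List.foldl_congr_mem _ _
    (fun acc yr => acc ++ ((PySem.List.enumerate yr.2.toList 0).filter
      (fun xc => xc.2 ≠ '.')).map (fun xc => (xc.1, yr.1, xc.2))) _
    (fun acc yr _ => PySem.List.foldl_append_ite _ _ _ _)) ?_
  rw [PySem.List.foldl_append_eq_flatMap]
  rfl

theorem pvA_eq (grid : List String) :
    count_resonant_antinode_locations grid = PySem.Set.len (pvAntinodes grid) := by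
  simp only [count_resonant_antinode_locations, pvAntsA_eq]
  rfl

set_option maxHeartbeats 1000000 in
theorem pv_mem_factor (grid : List String) (g : List (Int × Int))
    (pr : (Int × Int) × (Int × Int)) (an : PySem.Set (Int × Int)) (p : Int × Int) :
    p ∈ pvPairF grid g an pr ↔
      p ∈ an ∨ pvQIn g pr p ∨ pvQF grid pr p := by
  simp only [pvPairF]
  rw [pv_mem_foldl _ _ (fun factor q =>
      (0 ≤ pr.1.1 + factor * (pvDirection (pr.2.1 - pr.1.1) (pr.2.2 - pr.1.2)).1 ∧
       pr.1.1 + factor * (pvDirection (pr.2.1 - pr.1.1) (pr.2.2 - pr.1.2)).1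
         < PySem.Str.len (PySem.List.pyGetD grid 0 "") ∧
       0 ≤ pr.1.2 + factor * (pvDirection (pr.2.1 - pr.1.1) (pr.2.2 - pr.1.2)).2 ∧
       pr.1.2 + factor * (pvDirection (pr.2.1 - pr.1.1) (pr.2.2 - pr.1.2)).2
         < PySem.List.len grid) ∧
      q = (pr.1.1 + factor * (pvDirection (pr.2.1 - pr.1.1) (pr.2.2 - pr.1.2)).1,
           pr.1.2 + factor * (pvDirection (pr.2.1 - pr.1.1) (pr.2.2 - pr.1.2)).2))
    (fun s x q _ => by
      dsimp only
      split_ifs with hc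
      · rw [PySem.Set.mem_add]
        constructor
        · rintro (h | h)
          exacts [Or.inl h, Or.inr ⟨hc, h⟩]
        · rintro (h | ⟨-, h⟩)
          exacts [Or.inl h, Or.inr h]
      · constructor
        · exact Or.inl
        · rintro (h | ⟨hC, -⟩)
          exacts [h, absurd hC hc])]
  rw [PySem.Set.mem_update]
  rw [pv_mem_foldl _ _ (fun a q =>
      pvDirection (a.1 - pr.1.1) (a.2 - pr.1.2)
        = pvDirection (pr.2.1 - pr.1.1) (pr.2.2 - pr.1.2) ∧ q = a)
    (fun s x q _ => by
      dsimp only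
      split_ifs with hc
      · rw [PySem.Set.mem_add]
        constructor
        · rintro (h | h)
          exacts [Or.inl h, Or.inr ⟨hc, h⟩]
        · rintro (h | ⟨-, h⟩)
          exacts [Or.inl h, Or.inr h]
      · constructor
        · exact Or.inl
        · rintro (h | ⟨hC, -⟩)
          exacts [h, absurd hC hc])]
  have hemp : (p ∈ PySem.Set.empty) ↔ False := by simp [PySem.Set.empty]
  rw [hemp, false_or]
  unfold pvQIn pvQF pvDV
  rw [or_assoc]

theorem pv_nodup_pairF (grid : List String) (g : List (Int × Int))
    (pr : (Int × Int) × (Int × Int)) (an : PySem.Set (Int × Int)) (han : an.Nodup) :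
    (pvPairF grid g an pr).Nodup := by
  simp only [pvPairF]
  refine pv_nodup_foldl _ _ (fun s x _ hs => ?_) _ (PySem.Set.nodup_update _ _ han)
  split_ifs with hc
  · exact PySem.Set.nodup_add _ _ hs
  · exact hs

theorem pv_antinodes_nodup (grid : List String) : (pvAntinodes grid).Nodup := by
  unfold pvAntinodes
  refine pv_nodup_foldl _ _ (fun s fg _ hs => ?_) _ List.nodup_nil
  exact pv_nodup_foldl _ _ (fun s2 pr _ hs2 => pv_nodup_pairF grid fg.2 pr s2 hs2) _ hs

theorem pv_mem_antinodes (grid : List String) (p : Int × Int) :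
    p ∈ pvAntinodes grid ↔ ∃ c ∈ PySem.Set.ofList (pvFreqs grid),
      ∃ pr ∈ pvCombinations (pvGroup grid c),
        pvQIn (pvGroup grid c) pr p ∨ pvQF grid pr p := by
  unfold pvAntinodes
  rw [pvDict_items]
  rw [pv_mem_foldl _ _ (fun fg q =>
      ∃ pr ∈ pvCombinations fg.2, pvQIn fg.2 pr q ∨ pvQF grid pr q)
    (fun s fg q _ => pv_mem_foldl _ _
      (fun pr q' => pvQIn fg.2 pr q' ∨ pvQF grid pr q')
      (fun s2 pr q' _ => pv_mem_factor grid fg.2 pr s2 q') s q)]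
  have hemp : (p ∈ PySem.Set.empty) ↔ False := by simp [PySem.Set.empty]
  rw [hemp, false_or]
  constructor
  · rintro ⟨fg, hfg, pr, hpr, hq⟩
    rw [List.mem_map] at hfg
    obtain ⟨c, hc, rfl⟩ := hfg
    exact ⟨c, hc, pr, hpr, hq⟩
  · rintro ⟨c, hc, pr, hpr, hq⟩
    exact ⟨(c, pvGroup grid c), List.mem_map_of_mem hc, pr, hpr, hq⟩

-- -------- pairs of a frequency group --------
theorem pv_mem_comb_group (grid : List String) (c : Char) (pr : (Int × Int) × (Int × Int)) :
    pr ∈ pvCombinations (pvGroup grid c) ↔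
      ∃ ab ∈ pvCombinations (pvAnts grid), ab.1.2.2 = c ∧ ab.2.2.2 = c ∧
        pr = ((ab.1.1, ab.1.2.1), (ab.2.1, ab.2.2.1)) := by
  unfold pvGroup
  rw [pvCombinations_map, pvCombinations_filter]
  constructor
  · intro h
    rw [List.mem_map] at h
    obtain ⟨ab, hab, rfl⟩ := h
    rw [List.mem_filter] at hab
    obtain ⟨hab, hf⟩ := hab
    rw [Bool.and_eq_true, beq_iff_eq, beq_iff_eq] at hf
    exact ⟨ab, hab, hf.1, hf.2, rfl⟩
  · rintro ⟨ab, hab, h1, h2, rfl⟩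
    rw [List.mem_map]
    refine ⟨ab, ?_, rfl⟩
    rw [List.mem_filter, Bool.and_eq_true, beq_iff_eq, beq_iff_eq]
    exact ⟨hab, h1, h2⟩

theorem pv_pre_bound (grid : List String) (hpre : Pre_count_resonant_antinode_locations grid)
    {t a b : Int × Int × Char} (ht : t ∈ pvAnts grid) (ha : a ∈ pvAnts grid)
    (hb : b ∈ pvAnts grid) (hta : t.2.2 = a.2.2) (htb : t.2.2 = b.2.2)
    (hne : pvPos a ≠ pvPos b) :
    t.1 < PySem.Str.len (PySem.List.pyGetD grid 0 "") := by
  by_cases h : (a.1, a.2.1) = (t.1, t.2.1)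
  · refine hpre t ht ⟨b, hb, ?_, htb.symm⟩
    rw [← h]
    intro he
    exact hne (by rw [pvPos, pvPos, he])
  · exact hpre t ht ⟨a, ha, h, hta.symm⟩

theorem pv_coll_of_mult {p a b : Int × Int} {s g d1 d2 : Int}
    (h1 : p.1 - a.1 = s * d1) (h2 : p.2 - a.2 = s * d2)
    (h3 : b.1 - a.1 = g * d1) (h4 : b.2 - a.2 = g * d2) : pvColl p a b := by
  rw [pvColl, h1, h2, h3, h4]
  ring

theorem pv_pair_fwd (grid : List String) (hpre : Pre_count_resonant_antinode_locations grid)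
    {c : Char} {pr : (Int × Int) × (Int × Int)} {p : Int × Int}
    (hpr : pr ∈ pvCombinations (pvGroup grid c))
    (h : pvQIn (pvGroup grid c) pr p ∨ pvQF grid pr p) :
    pvFrame grid p ∧ pvPred grid p := by
  obtain ⟨ab, hab, hfa, hfb, rfl⟩ := (pv_mem_comb_group grid c pr).mp hpr
  have ha : ab.1 ∈ pvAnts grid := (pvCombinations_mem hab).1
  have hb : ab.2 ∈ pvAnts grid := (pvCombinations_mem hab).2
  have hne : pvPos ab.1 ≠ pvPos ab.2 :=
    pvCombinations_pairwise (pvAnts_pairwise grid) ab hab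
  have hnz : ¬ (ab.2.1 - ab.1.1 = 0 ∧ ab.2.2.1 - ab.1.2.1 = 0) := by
    rintro ⟨h1, h2⟩
    apply hne
    rw [pvPos, pvPos, Prod.mk.injEq]
    omega
  obtain ⟨hg, hdx, hdy, hg1⟩ := pvDirection_scale hnz
  have hfreq : ab.1.2.2 = ab.2.2.2 := by rw [hfa, hfb]
  rcases h with ⟨q, hq, hdir, rfl⟩ | ⟨f, hfr, hcond, rfl⟩
  · -- the in-line antenna q is itself in the frame and collinear
    unfold pvGroup at hq
    rw [List.mem_map] at hq
    obtain ⟨t, htf, rfl⟩ := hq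
    rw [List.mem_filter, beq_iff_eq] at htf
    obtain ⟨ht, htc⟩ := htf
    have hbnd := pvAnts_bounds ht
    have hxw : t.1 < PySem.Str.len (PySem.List.pyGetD grid 0 "") :=
      pv_pre_bound grid hpre ht ha hb (by rw [htc, hfa]) (by rw [htc, hfb]) hne
    have hframe : pvFrame grid (t.1, t.2.1) := ⟨hbnd.1, hxw, hbnd.2.1, hbnd.2.2⟩
    refine ⟨hframe, ab, hab, hfreq, ?_⟩
    simp only [pvDV] at hdir
    by_cases hz : t.1 - ab.1.1 = 0 ∧ t.2.1 - ab.1.2.1 = 0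
    · exact pv_coll_of_mult (s := 0) (by simp only [pvPos]; rw [hz.1]; simp)
        (by simp only [pvPos]; rw [hz.2]; simp) hdx hdy
    · obtain ⟨hg', hdx', hdy', -⟩ := pvDirection_scale hz
      rw [hdir] at hdx' hdy'
      exact pv_coll_of_mult hdx' hdy' hdx hdy
  · -- a generated point of the factor scan
    refine ⟨⟨hcond.1, hcond.2.1, hcond.2.2.1, hcond.2.2.2⟩, ab, hab, hfreq, ?_⟩
    simp only [pvDV]
    exact pv_coll_of_mult (s := f) (by simp only [pvPos]; ring) (by simp only [pvPos]; ring)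
      hdx hdy

theorem pv_pair_bwd (grid : List String) (hpre : Pre_count_resonant_antinode_locations grid)
    {p : Int × Int} (hf : pvFrame grid p) (hp : pvPred grid p) :
    ∃ c ∈ PySem.Set.ofList (pvFreqs grid),
      ∃ pr ∈ pvCombinations (pvGroup grid c),
        pvQIn (pvGroup grid c) pr p ∨ pvQF grid pr p := by
  obtain ⟨ab, hab, hfreq, hcoll⟩ := hp
  have ha : ab.1 ∈ pvAnts grid := (pvCombinations_mem hab).1
  have hb : ab.2 ∈ pvAnts grid := (pvCombinations_mem hab).2
  have hne : pvPos ab.1 ≠ pvPos ab.2 :=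
    pvCombinations_pairwise (pvAnts_pairwise grid) ab hab
  refine ⟨ab.1.2.2, ?_, ((ab.1.1, ab.1.2.1), (ab.2.1, ab.2.2.1)), ?_, ?_⟩
  · rw [PySem.Set.mem_ofList]
    exact List.mem_map_of_mem ha
  · exact (pv_mem_comb_group grid _ _).mpr ⟨ab, hab, rfl, hfreq.symm, rfl⟩
  · right
    have hnz : ¬ (ab.2.1 - ab.1.1 = 0 ∧ ab.2.2.1 - ab.1.2.1 = 0) := by
      rintro ⟨h1, h2⟩
      apply hne
      rw [pvPos, pvPos, Prod.mk.injEq]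
      omega
    obtain ⟨hg, hdx, hdy, hg1⟩ := pvDirection_scale hnz
    have hdvnz := pvDirection_ne_zero hnz
    have hbnd := pvAnts_bounds ha
    have hxw : ab.1.1 < PySem.Str.len (PySem.List.pyGetD grid 0 "") :=
      pv_pre_bound grid hpre ha ha hb rfl hfreq hne
    have hyH : ab.1.2.1 < PySem.List.len grid := by
      have := hbnd.2.2
      rw [pvH] at this
      exact this
    have hfp : 0 ≤ p.1 ∧ p.1 < PySem.Str.len (PySem.List.pyGetD grid 0 "") ∧
        0 ≤ p.2 ∧ p.2 < PySem.List.len grid := by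
      obtain ⟨h1, h2, h3, h4⟩ := hf
      rw [pvW] at h2
      rw [pvH] at h4
      exact ⟨h1, h2, h3, h4⟩
    -- the cross product reduces to the primitive direction
    have h0 := hcoll
    rw [pvColl, pvPos, pvPos] at h0
    simp only at h0
    have hred : (p.1 - ab.1.1) * (pvDirection (ab.2.1 - ab.1.1) (ab.2.2.1 - ab.1.2.1)).2
        = (p.2 - ab.1.2.1) * (pvDirection (ab.2.1 - ab.1.1) (ab.2.2.1 - ab.1.2.1)).1 := by
      refine mul_left_cancel₀ (ne_of_gt hg) ?_
      calc ((Int.gcd (ab.2.1 - ab.1.1) (ab.2.2.1 - ab.1.2.1) : Int))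
            * ((p.1 - ab.1.1) * (pvDirection (ab.2.1 - ab.1.1) (ab.2.2.1 - ab.1.2.1)).2)
          = (p.1 - ab.1.1) * ((Int.gcd (ab.2.1 - ab.1.1) (ab.2.2.1 - ab.1.2.1) : Int)
              * (pvDirection (ab.2.1 - ab.1.1) (ab.2.2.1 - ab.1.2.1)).2) := by ring
        _ = (p.1 - ab.1.1) * (ab.2.2.1 - ab.1.2.1) := by conv_lhs => rw [← hdy]
        _ = (p.2 - ab.1.2.1) * (ab.2.1 - ab.1.1) := h0
        _ = (p.2 - ab.1.2.1) * ((Int.gcd (ab.2.1 - ab.1.1) (ab.2.2.1 - ab.1.2.1) : Int)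
              * (pvDirection (ab.2.1 - ab.1.1) (ab.2.2.1 - ab.1.2.1)).1) := by
            conv_lhs => rw [hdx]
        _ = ((Int.gcd (ab.2.1 - ab.1.1) (ab.2.2.1 - ab.1.2.1) : Int))
            * ((p.2 - ab.1.2.1) * (pvDirection (ab.2.1 - ab.1.1) (ab.2.2.1 - ab.1.2.1)).1) := by
            ring
    obtain ⟨t, hu, hv⟩ := pv_parallel hg1 hdvnz hred
    have habs : -(PySem.List.len grid * PySem.Str.len (PySem.List.pyGetD grid 0 "")) ≤ t ∧
        t < PySem.List.len grid * PySem.Str.len (PySem.List.pyGetD grid 0 "") := by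
      have hW1 : 0 < PySem.Str.len (PySem.List.pyGetD grid 0 "") := by
        have := hbnd.1
        omega
      have hH1 : 0 < PySem.List.len grid := by
        have := hbnd.2.1
        omega
      have hWHW : PySem.Str.len (PySem.List.pyGetD grid 0 "")
          ≤ PySem.List.len grid * PySem.Str.len (PySem.List.pyGetD grid 0 "") :=
        le_mul_of_one_le_left (by omega) (by omega)
      have hHHW : PySem.List.len grid
          ≤ PySem.List.len grid * PySem.Str.len (PySem.List.pyGetD grid 0 "") :=
        le_mul_of_one_le_right (by omega) (by omega)
      rcases not_and_or.mp hdvnz with hd | hd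
      · have h1 : |t| ≤ |p.1 - ab.1.1| := by
          calc |t| = |t| * 1 := (mul_one _).symm
            _ ≤ |t| * |(pvDirection (ab.2.1 - ab.1.1) (ab.2.2.1 - ab.1.2.1)).1| := by
                have h2 : (1 : Int) ≤ |(pvDirection (ab.2.1 - ab.1.1) (ab.2.2.1 - ab.1.2.1)).1| :=
                  Int.one_le_abs (by omega)
                exact mul_le_mul_of_nonneg_left h2 (abs_nonneg t)
            _ = |p.1 - ab.1.1| := by rw [← abs_mul, ← hu]
        have h2 : |p.1 - ab.1.1| ≤ PySem.Str.len (PySem.List.pyGetD grid 0 "") - 1 := by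
          rw [abs_le]
          constructor <;> omega
        have := abs_le.mp (h1.trans h2)
        constructor <;> omega
      · have h1 : |t| ≤ |p.2 - ab.1.2.1| := by
          calc |t| = |t| * 1 := (mul_one _).symm
            _ ≤ |t| * |(pvDirection (ab.2.1 - ab.1.1) (ab.2.2.1 - ab.1.2.1)).2| := by
                have h2 : (1 : Int) ≤ |(pvDirection (ab.2.1 - ab.1.1) (ab.2.2.1 - ab.1.2.1)).2| :=
                  Int.one_le_abs (by omega)
                exact mul_le_mul_of_nonneg_left h2 (abs_nonneg t)
            _ = |p.2 - ab.1.2.1| := by rw [← abs_mul, ← hv]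
        have h2 : |p.2 - ab.1.2.1| ≤ PySem.List.len grid - 1 := by
          rw [abs_le]
          constructor <;> omega
        have := abs_le.mp (h1.trans h2)
        constructor <;> omega
    have he1 : ab.1.1 + t * (pvDirection (ab.2.1 - ab.1.1) (ab.2.2.1 - ab.1.2.1)).1 = p.1 := by
      linarith [hu]
    have he2 : ab.1.2.1 + t * (pvDirection (ab.2.1 - ab.1.1) (ab.2.2.1 - ab.1.2.1)).2 = p.2 := by
      linarith [hv]
    refine ⟨t, ?_, ?_, ?_⟩
    · rw [PySem.List.mem_pyRange_one]
      exact ⟨habs.1, habs.2⟩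
    · simp only [pvDV]
      rw [he1, he2]
      exact ⟨hfp.1, hfp.2.1, hfp.2.2.1, hfp.2.2.2⟩
    · simp only [pvDV]
      rw [he1, he2]

-- -------- main proof --------

-- ===== VERDICT (by name: the statement is the Claim_ definition above) =====
theorem count_resonant_antinode_locations_spec : Claim_equal_count_resonant_antinode_locations := by
  unfold Claim_equal_count_resonant_antinode_locations
  intro grid _ hpre
  unfold Spec_count_resonant_antinode_locations
  rw [pvA_eq]
  have hmem : ∀ p, p ∈ pvAntinodes grid ↔ pvFrame grid p ∧ pvPred grid p := by
    intro p
    rw [pv_mem_antinodes]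
    constructor
    · rintro ⟨c, hc, pr, hpr, hq⟩
      exact pv_pair_fwd grid hpre hpr hq
    · rintro ⟨hf, hp⟩
      exact pv_pair_bwd grid hpre hf hp
  have h := pv_count grid (pvAntinodes grid) (pv_antinodes_nodup grid) hmem
  rw [← h]
  rfl
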